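-- pv_equiv track=rewrite | github.com/sharlynmuturi/Document-AI-System | scripts/extraction.py | generate_bio_labels
-- ===== SOURCE A (Python) =====
-- def generate_bio_labels(tokens, extracted_fields):
--     """
--     Convert extracted values into BIO token labels for ML training.
--     """
--     labels = ["O"] * len(tokens)
--
--     for field, value in extracted_fields.items():
--         if not value:
--             continue
--         value_tokens = value.split()
--         for i in range(len(tokens)):
--             if tokens[i:i+len(value_tokens)] == value_tokens:
--                 labels[i] = f"B-{field.upper()}"
--                 for j in range(1, len(value_tokens)):
--                     labels[i+j] = f"I-{field.upper()}"
--
--     return labels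
-- ===== SOURCE B (Python) =====
-- def generate_bio_labels(tokens, extracted_fields):
--     """
--     Convert extracted values into BIO token labels for ML training.
--
--     Rabin-Karp: token-level prefix hashes are computed once, so each candidate
--     window is compared to the pattern in O(1) by rolling hash, with the O(m)
--     token comparison run only to verify a hash hit.
--     """
--     MOD = 1000000007
--     BASE = 131
--     n = len(tokens)
--     thash = [_tok_hash(t) for t in tokens]
--     pref = [0]
--     acc = 0
--     for h in thash:
--         acc = (acc * BASE + h) % MOD
--         pref.append(acc)
--     labels = ["O"] * n
--     for field, value in extracted_fields.items():
--         if not value: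
--             continue
--         pat = value.split()
--         m = len(pat)
--         tag = field.upper()
--         ph = 0
--         for t in pat:
--             ph = (ph * BASE + _tok_hash(t)) % MOD
--         bm = pow(BASE, m, MOD)
--         for i in range(n):
--             if i + m <= n and (pref[i + m] - pref[i] * bm) % MOD == ph \
--                     and tokens[i:i + m] == pat:
--                 labels[i] = "B-" + tag
--                 for j in range(1, m):
--                     labels[i + j] = "I-" + tag
--     return labels
--
--
-- def _tok_hash(s):
--     h = 0
--     for c in s:
--         h = (h * 257 + ord(c) + 1) % 1000000007
--     return h
-- ===== Notes on version B (the rewrite author's own statement) =====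
-- stated objective: alternative
-- what changed: Replaces A's O(m) slice comparison at every scan position by Rabin-Karp: token-level prefix hashes are computed once, each window is compared to the pattern's hash by an O(1) rolling-hash check, and the token-by-token comparison runs only to verify a hash hit; on adversarial inputs with long shared prefixes this avoids deep slice compares, though on random inputs the hashing overhead makes it comparable.
import Mathlib
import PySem

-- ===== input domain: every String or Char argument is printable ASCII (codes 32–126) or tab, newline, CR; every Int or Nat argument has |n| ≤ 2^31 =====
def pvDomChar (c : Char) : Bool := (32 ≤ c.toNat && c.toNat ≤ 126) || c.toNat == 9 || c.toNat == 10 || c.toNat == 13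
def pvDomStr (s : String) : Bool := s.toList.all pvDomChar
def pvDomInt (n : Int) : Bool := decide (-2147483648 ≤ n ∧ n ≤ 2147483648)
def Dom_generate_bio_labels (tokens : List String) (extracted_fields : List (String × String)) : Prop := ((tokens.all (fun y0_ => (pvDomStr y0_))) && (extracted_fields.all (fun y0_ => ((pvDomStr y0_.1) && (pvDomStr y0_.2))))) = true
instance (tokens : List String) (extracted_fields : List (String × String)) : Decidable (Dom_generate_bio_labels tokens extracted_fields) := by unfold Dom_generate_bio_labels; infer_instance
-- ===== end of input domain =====

-- B replaces A's per-position slice comparison by Rabin-Karp: prefix hashes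
-- computed once give an O(1) rolling-hash window check, with the token
-- comparison run only to verify a hash hit (objective: alternative).

-- ===== PORT A =====
def generate_bio_labels (tokens : List String) (extracted_fields : List (String × String)) : List String :=
  let labels := List.replicate tokens.length "O"
  extracted_fields.foldl (fun labels fv =>
    if fv.2 = "" then labels
    else
      let value_tokens := PySem.Str.split₀ fv.2
      (List.range tokens.length).foldl (fun labels (i : Nat) =>
        if PySem.List.slice tokens (some (i : Int)) (some ((i : Int) + (value_tokens.length : Int))) = value_tokens then
          let labels := PySem.List.pySetD labels (i : Int) ("B-" ++ PySem.Str.upper fv.1)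
          (PySem.List.pyRange 1 (value_tokens.length : Int) 1).foldl (fun labels j =>
            PySem.List.pySetD labels ((i : Int) + j) ("I-" ++ PySem.Str.upper fv.1)) labels
        else labels) labels) labels

-- ===== PORT B =====
-- B-side helper: _tok_hash in Source B (ord c = c.toNat on the ASCII domain)
def tokHash (s : String) : Int :=
  s.toList.foldl (fun h c => PySem.Int.mod (h * 257 + (c.toNat : Int) + 1) 1000000007) 0

def generate_bio_labels_alt (tokens : List String) (extracted_fields : List (String × String)) : List String :=
  let n := tokens.length
  let thash := tokens.map tokHash
  let pref := (thash.foldl (fun (st : List Int × Int) h =>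
      let acc := PySem.Int.mod (st.2 * 131 + h) 1000000007
      (st.1 ++ [acc], acc)) ([0], 0)).1
  let labels := List.replicate n "O"
  extracted_fields.foldl (fun labels fv =>
    if fv.2 = "" then labels
    else
      let pat := PySem.Str.split₀ fv.2
      let m := pat.length
      let tag := PySem.Str.upper fv.1
      let ph := pat.foldl (fun a t => PySem.Int.mod (a * 131 + tokHash t) 1000000007) 0
      let bm := PySem.Int.mod ((131 : Int) ^ m) 1000000007
      (List.range n).foldl (fun labels (i : Nat) =>
        if i + m ≤ n ∧
            PySem.Int.mod (PySem.List.pyGetD pref ((i : Int) + (m : Int)) 0 -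
              PySem.List.pyGetD pref (i : Int) 0 * bm) 1000000007 = ph ∧
            PySem.List.slice tokens (some (i : Int)) (some ((i : Int) + (m : Int))) = pat then
          let labels := PySem.List.pySetD labels (i : Int) ("B-" ++ tag)
          (PySem.List.pyRange 1 (m : Int) 1).foldl (fun labels j =>
            PySem.List.pySetD labels ((i : Int) + j) ("I-" ++ tag)) labels
        else labels) labels) labels

-- ===== PRECONDITION & SPEC =====
def Spec_generate_bio_labels (tokens : List String) (extracted_fields : List (String × String)) (out : List String) : Prop := out = generate_bio_labels_alt tokens extracted_fields
instance (tokens : List String) (extracted_fields : List (String × String)) (out : List String) : Decidable (Spec_generate_bio_labels tokens extracted_fields out) := by unfold Spec_generate_bio_labels; infer_instance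

-- ===== CLAIM (what is proved, stated in full; the proofs are below) =====
def Claim_equal_generate_bio_labels : Prop := ∀ (tokens : List String) (extracted_fields : List (String × String)), Dom_generate_bio_labels tokens extracted_fields → Spec_generate_bio_labels tokens extracted_fields (generate_bio_labels tokens extracted_fields)

-- ===== LEMMAS AND PROOFS =====

def hstep (a h : Int) : Int := PySem.Int.mod (a * 131 + h) 1000000007
def hrun (a : Int) (hs : List Int) : Int := hs.foldl hstep a
def prefList (a : Int) : List Int → List Int
  | [] => []
  | h :: t => hstep a h :: prefList (hstep a h) t

theorem cast_mod (x : Int) : ((PySem.Int.mod x 1000000007 : Int) : ZMod 1000000007) = (x : ZMod 1000000007) := by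
  rw [PySem.Int.mod_eq_emod_of_pos (by norm_num : (0:ℤ) < 1000000007), Int.emod_def]
  push_cast
  have h0 : (1000000007 : ZMod 1000000007) = 0 := by exact_mod_cast ZMod.natCast_self 1000000007
  rw [h0]; ring

def hrunZ (a : ZMod 1000000007) (hs : List Int) : ZMod 1000000007 :=
  hs.foldl (fun x h => x * 131 + (h : ZMod 1000000007)) a

theorem cast_hrun (hs : List Int) : ∀ a : Int, ((hrun a hs : Int) : ZMod 1000000007) = hrunZ (a : ZMod 1000000007) hs := by
  induction hs with
  | nil => intro a; rfl
  | cons h t ih =>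
    intro a
    show ((hrun (hstep a h) t : Int) : ZMod 1000000007) = hrunZ _ t
    rw [ih, hstep, cast_mod]; push_cast; rfl

theorem hrunZ_shift (hs : List Int) : ∀ a, hrunZ a hs = a * 131 ^ hs.length + hrunZ 0 hs := by
  induction hs with
  | nil => intro a; simp [hrunZ]
  | cons h t ih =>
    intro a
    show hrunZ (a * 131 + (h:ZMod 1000000007)) t = a * 131 ^ (h :: t).length + hrunZ (0 * 131 + (h:ZMod 1000000007)) t
    rw [ih (a * 131 + (h:ZMod 1000000007)), ih (0 * 131 + (h:ZMod 1000000007))]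
    simp [List.length_cons]; ring

theorem hrunZ_append (l1 l2 : List Int) (a : ZMod 1000000007) : hrunZ a (l1 ++ l2) = hrunZ (hrunZ a l1) l2 := by
  simp [hrunZ]

theorem hrun_range (hs : List Int) (hne : hs ≠ []) : ∀ a, 0 ≤ hrun a hs ∧ hrun a hs < 1000000007 := by
  induction hs with
  | nil => exact absurd rfl hne
  | cons h t ih =>
    intro a
    cases t with
    | nil =>
      exact ⟨PySem.Int.mod_nonneg _ (by norm_num), PySem.Int.mod_lt _ (by norm_num)⟩
    | cons h2 t2 => exact ih (by simp) _

theorem int_eq_of_castZ {x y : Int} (hx0 : 0 ≤ x) (hx1 : x < 1000000007) (hy0 : 0 ≤ y) (hy1 : y < 1000000007)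
    (h : (x : ZMod 1000000007) = (y : ZMod 1000000007)) : x = y := by
  rw [ZMod.intCast_eq_intCast_iff] at h
  have h2 : x % ((1000000007 : ℕ) : ℤ) = y % ((1000000007 : ℕ) : ℤ) := h
  rw [Int.emod_eq_of_lt hx0 (by exact_mod_cast hx1), Int.emod_eq_of_lt hy0 (by exact_mod_cast hy1)] at h2
  exact h2

theorem prefFold (hs : List Int) : ∀ (out : List Int) (acc : Int),
    hs.foldl (fun (st : List Int × Int) h =>
      let acc := PySem.Int.mod (st.2 * 131 + h) 1000000007
      (st.1 ++ [acc], acc)) (out, acc) = (out ++ prefList acc hs, hrun acc hs) := by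
  induction hs with
  | nil => intro out acc; simp [prefList, hrun]
  | cons h t ih =>
    intro out acc
    show t.foldl _ (out ++ [hstep acc h], hstep acc h) = _
    rw [ih]
    simp [prefList, hrun, List.foldl_cons]

theorem prefGet (hs : List Int) : ∀ (acc : Int) (i : Nat), i ≤ hs.length →
    (acc :: prefList acc hs).getD i 0 = hrun acc (hs.take i) := by
  induction hs with
  | nil =>
    intro acc i hi
    cases i with
    | zero => rfl
    | succ j => simp at hi
  | cons h t ih =>
    intro acc i hi
    cases i with
    | zero => rfl
    | succ j =>
      show (prefList acc (h :: t)).getD j 0 = hrun acc ((h :: t).take (j+1))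
      show ((hstep acc h) :: prefList (hstep acc h) t).getD j 0 = _
      rw [ih (hstep acc h) j (by simpa using hi)]
      rfl

theorem ph_eq (pat : List String) :
    pat.foldl (fun a t => PySem.Int.mod (a * 131 + tokHash t) 1000000007) 0 = hrun 0 (pat.map tokHash) := by
  simp [hrun, hstep, List.foldl_map]

-- on a real match the window's rolling hash equals the pattern's hash
theorem hash_sound (tokens pat : List String) (i : Nat)
    (hm : pat ≠ []) (h1 : i + pat.length ≤ tokens.length)
    (hsl : (tokens.drop i).take pat.length = pat) :
    PySem.Int.mod (PySem.List.pyGetD (0 :: prefList 0 (tokens.map tokHash)) ((i : Int) + (pat.length : Int)) 0 -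
        PySem.List.pyGetD (0 :: prefList 0 (tokens.map tokHash)) (i : Int) 0 *
        PySem.Int.mod ((131 : Int) ^ pat.length) 1000000007) 1000000007
      = hrun 0 (pat.map tokHash) := by
  have hlen : (tokens.map tokHash).length = tokens.length := by simp
  have g1 : PySem.List.pyGetD (0 :: prefList 0 (tokens.map tokHash)) ((i : Int) + (pat.length : Int)) 0
      = hrun 0 ((tokens.map tokHash).take (i + pat.length)) := by
    rw [show ((i : Int) + (pat.length : Int)) = (((i + pat.length : Nat)) : Int) by push_cast; ring]
    rw [PySem.List.pyGetD_natCast]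
    exact prefGet _ 0 _ (by omega)
  have g2 : PySem.List.pyGetD (0 :: prefList 0 (tokens.map tokHash)) (i : Int) 0
      = hrun 0 ((tokens.map tokHash).take i) := by
    rw [PySem.List.pyGetD_natCast]
    exact prefGet _ 0 _ (by omega)
  rw [g1, g2]
  have hw : (tokens.map tokHash).take (i + pat.length)
      = (tokens.map tokHash).take i ++ (pat.map tokHash) := by
    rw [List.take_add]
    congr 1
    rw [← List.map_drop, ← List.map_take, hsl]
  apply int_eq_of_castZ (PySem.Int.mod_nonneg _ (by norm_num)) (PySem.Int.mod_lt _ (by norm_num))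
    (hrun_range _ (by simpa using hm) _).1 (hrun_range _ (by simpa using hm) _).2
  rw [cast_mod]
  push_cast
  rw [cast_mod, cast_hrun, cast_hrun, cast_hrun, hw, hrunZ_append, hrunZ_shift]
  push_cast
  have hml : (pat.map tokHash).length = pat.length := by simp
  rw [hml]
  ring

def stepA (tokens : List String) (labels : List String) (fv : String × String) : List String :=
  if fv.2 = "" then labels
  else
    (List.range tokens.length).foldl (fun labels (i : Nat) =>
      if PySem.List.slice tokens (some (i : Int)) (some ((i : Int) + ((PySem.Str.split₀ fv.2).length : Int))) = PySem.Str.split₀ fv.2 then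
        (PySem.List.pyRange 1 ((PySem.Str.split₀ fv.2).length : Int) 1).foldl (fun labels j =>
          PySem.List.pySetD labels ((i : Int) + j) ("I-" ++ PySem.Str.upper fv.1))
          (PySem.List.pySetD labels (i : Int) ("B-" ++ PySem.Str.upper fv.1))
      else labels) labels

theorem portA_eq (tokens : List String) (fields : List (String × String)) :
    generate_bio_labels tokens fields = fields.foldl (stepA tokens) (List.replicate tokens.length "O") := rfl

def stepB (tokens : List String) (labels : List String) (fv : String × String) : List String :=
  if fv.2 = "" then labels
  else
    (List.range tokens.length).foldl (fun labels (i : Nat) =>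
      if i + (PySem.Str.split₀ fv.2).length ≤ tokens.length ∧
          PySem.Int.mod (PySem.List.pyGetD (0 :: prefList 0 (tokens.map tokHash)) ((i : Int) + ((PySem.Str.split₀ fv.2).length : Int)) 0 -
            PySem.List.pyGetD (0 :: prefList 0 (tokens.map tokHash)) (i : Int) 0 *
            PySem.Int.mod ((131 : Int) ^ (PySem.Str.split₀ fv.2).length) 1000000007) 1000000007
            = (PySem.Str.split₀ fv.2).foldl (fun a t => PySem.Int.mod (a * 131 + tokHash t) 1000000007) 0 ∧
          PySem.List.slice tokens (some (i : Int)) (some ((i : Int) + ((PySem.Str.split₀ fv.2).length : Int))) = PySem.Str.split₀ fv.2 then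
        (PySem.List.pyRange 1 ((PySem.Str.split₀ fv.2).length : Int) 1).foldl (fun labels j =>
          PySem.List.pySetD labels ((i : Int) + j) ("I-" ++ PySem.Str.upper fv.1))
          (PySem.List.pySetD labels (i : Int) ("B-" ++ PySem.Str.upper fv.1))
      else labels) labels

theorem portB_eq (tokens : List String) (fields : List (String × String)) :
    generate_bio_labels_alt tokens fields = fields.foldl (stepB tokens) (List.replicate tokens.length "O") := by
  show (fields.foldl _ (List.replicate tokens.length "O")) = _
  have hp : ((tokens.map tokHash).foldl (fun (st : List Int × Int) h =>
      let acc := PySem.Int.mod (st.2 * 131 + h) 1000000007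
      (st.1 ++ [acc], acc)) ([0], 0)).1 = 0 :: prefList 0 (tokens.map tokHash) := by
    rw [show (([0], 0) : List Int × Int) = ([0] ++ [], 0) by simp] at *
    rw [show ([0] : List Int) = [(0:Int)] ++ [] by simp, prefFold]
    simp
  rw [hp]
  rfl

-- a slice that equals the pattern fits inside the list
theorem slice_fits (tokens pat : List String) (i : Nat)
    (hs : PySem.List.slice tokens (some (i : Int)) (some ((i : Int) + (pat.length : Int))) = pat) :
    i + pat.length ≤ tokens.length ∨ pat = [] := by
  by_cases hp : pat = []
  · right; exact hp
  · left
    rw [PySem.List.slice_natCast_add] at hs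
    have := congrArg List.length hs
    simp [List.length_take, List.length_drop] at this
    have hl : 0 < pat.length := Nat.pos_of_ne_zero (fun h0 => hp (List.length_eq_zero_iff.mp h0))
    omega

theorem step_eq (tokens : List String) (fv : String × String) (labels : List String) :
    stepA tokens labels fv = stepB tokens labels fv := by
  by_cases he : fv.2 = ""
  · rw [stepA, stepB, if_pos he, if_pos he]
  · rw [stepA, stepB, if_neg he, if_neg he]
    set pat := PySem.Str.split₀ fv.2 with hpdef
    apply PySem.List.foldl_congr_mem
    intro acc i hi
    have hin : i < tokens.length := List.mem_range.mp hi
    by_cases hs : PySem.List.slice tokens (some (i : Int)) (some ((i : Int) + (pat.length : Int))) = pat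
    · rw [if_pos hs]
      by_cases hp : pat = []
      · -- empty pattern: window hash and pattern hash are both 0
        rw [if_pos ?_]
        refine ⟨by rw [hp]; simpa using hin.le, ?_, hs⟩
        rw [hp]
        norm_num [PySem.Int.mod]
        rw [show Int.fmod (1:Int) 1000000007 = 1 from by decide, mul_one, sub_self]
        decide
      · have hfit : i + pat.length ≤ tokens.length := by
          rcases slice_fits tokens pat i hs with h | h
          · exact h
          · exact absurd h hp
        have hsl : (tokens.drop i).take pat.length = pat := by
          rw [← PySem.List.slice_natCast_add]; exact hs
        rw [if_pos ⟨hfit, by rw [hash_sound tokens pat i hp hfit hsl, ph_eq], hs⟩]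
    · rw [if_neg hs, if_neg (fun h => hs h.2.2)]

-- ===== VERDICT (by name: the statement is the Claim_ definition above) =====
theorem generate_bio_labels_spec : Claim_equal_generate_bio_labels := by
  intro tokens extracted_fields _
  show generate_bio_labels tokens extracted_fields = generate_bio_labels_alt tokens extracted_fields
  rw [portA_eq, portB_eq]
  exact PySem.List.foldl_congr_mem _ _ _ _ (fun acc fv _ => step_eq tokens fv acc)
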